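-- pv_equiv track=rewrite | github.com/saltyee1/Embedding_Lab11 | main.py | find_peaks_crest
-- ===== SOURCE A (Python) =====
-- def find_peaks_crest(src, min_distance, src_length):
--     peaks = []
--     for i in range(1, src_length - 1):
--         if src[i] > src[i - 1] and src[i] > src[i + 1]:
--             is_peak = True
--             start = max(i - min_distance, 0)
--             end = min(i + min_distance, src_length)
--             for j in range(start, end):
--                 if src[i] < src[j]:
--                     is_peak = False
--                     break
--             if is_peak:
--                 peaks.append(i)
--     return peaks
-- ===== SOURCE B (Python) =====
-- def find_peaks_crest(src, min_distance, src_length):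
--     # Sparse-table (doubling) range-maximum: build rows of window maxima of
--     # widths 1,2,4,..., then answer each candidate's window-max query in O(1).
--     if src_length < 3:
--         return []
--     n = src_length
--     rows = [[src[j] for j in range(n)]]
--     size = 1
--     while 2 * size <= n:
--         prev = rows[-1]
--         rows.append([max(prev[j], prev[j + size]) for j in range(n - 2 * size + 1)])
--         size *= 2
--     def range_max(a, b):
--         # max(src[a:b]) for 0 <= a < b <= n
--         k = len(rows) - 1
--         while (1 << k) > (b - a):
--             k -= 1
--         w = 1 << k
--         return max(rows[k][a], rows[k][b - w])
--     peaks = []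
--     for i in range(1, n - 1):
--         if src[i] > src[i - 1] and src[i] > src[i + 1]:
--             a = max(i - min_distance, 0)
--             b = min(i + min_distance, n)
--             if a >= b or src[i] >= range_max(a, b):
--                 peaks.append(i)
--     return peaks
-- ===== Notes on version B (the rewrite author's own statement) =====
-- stated objective: alternative
-- what changed: B replaces A's per-candidate rescan of the whole +/-min_distance window by a doubling sparse table (rows of window maxima of widths 1,2,4,...) built once, answering each candidate's window-maximum query with two O(1) lookups.
-- outside the precondition, e.g. on find_peaks_crest([0, 2, 0, 0], 1, 5): A returns [1], B raises IndexError; on find_peaks_crest([5, 1], 1, 3): A returns [], B raises IndexError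
import Mathlib
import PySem

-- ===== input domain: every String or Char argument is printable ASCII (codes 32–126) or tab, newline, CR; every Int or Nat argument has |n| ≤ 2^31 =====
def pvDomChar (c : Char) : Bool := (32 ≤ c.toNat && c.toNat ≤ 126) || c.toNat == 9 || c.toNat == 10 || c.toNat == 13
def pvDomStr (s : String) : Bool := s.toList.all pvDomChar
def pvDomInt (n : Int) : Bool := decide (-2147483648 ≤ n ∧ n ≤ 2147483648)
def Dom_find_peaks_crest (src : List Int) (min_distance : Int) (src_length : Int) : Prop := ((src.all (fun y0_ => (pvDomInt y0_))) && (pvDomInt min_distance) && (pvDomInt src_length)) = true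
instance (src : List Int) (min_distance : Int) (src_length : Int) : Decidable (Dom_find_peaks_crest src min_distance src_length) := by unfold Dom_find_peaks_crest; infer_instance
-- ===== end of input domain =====

-- B replaces A's per-candidate rescan of its ±min_distance window by a doubling sparse table of
-- window maxima built once (alternative algorithm, better worst case; not measured faster on random data).

-- shared accessor: src[i] (both Pythons index the same way; Pre_ keeps every index in range)
def pvGet (xs : List Int) (i : Int) : Int := PySem.List.pyGetD xs i 0

-- ===== PORT A =====
-- A's inner j-loop with its break: scans the window, False as soon as src[i] < src[j]
def pvAScan (src : List Int) (vi : Int) : List Int → Bool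
  | [] => true
  | j :: js => if vi < pvGet src j then false else pvAScan src vi js

def find_peaks_crest (src : List Int) (min_distance : Int) (src_length : Int) : List Int :=
  (PySem.List.pyRange 1 (src_length - 1) 1).foldl
    (fun peaks i =>
      if pvGet src i > pvGet src (i - 1) ∧ pvGet src i > pvGet src (i + 1) then
        if pvAScan src (pvGet src i)
            (PySem.List.pyRange (max (i - min_distance) 0) (min (i + min_distance) src_length) 1) then
          peaks ++ [i]
        else peaks
      else peaks) []

-- ===== PORT B =====
-- rows.append([max(prev[j], prev[j+size]) for j in range(n - 2*size + 1)])
def pvNextRow (prev : List Int) (size n : Int) : List Int :=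
  (PySem.List.pyRange 0 (n - 2 * size + 1) 1).map
    (fun j => max (pvGet prev j) (pvGet prev (j + size)))

-- the `while 2*size <= n` row-building loop (fuel only makes it total; the guard exits first)
def pvRowsAux : Nat → List Int → Int → Int → List (List Int)
  | 0, _, _, _ => []
  | fuel + 1, prev, size, n =>
    if 2 * size ≤ n then
      pvNextRow prev size n :: pvRowsAux fuel (pvNextRow prev size n) (2 * size) n
    else []

-- the `k = len(rows)-1; while (1 << k) > (b-a): k -= 1` descent of range_max
def pvPickK : Nat → Int → Nat
  | 0, _ => 0
  | k + 1, d => if d < 2 ^ (k + 1) then pvPickK k d else k + 1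

-- range_max(a, b) = max(rows[k][a], rows[k][b-w])
def pvRangeMax (rows : List (List Int)) (a b : Int) : Int :=
  max (pvGet (rows.getD (pvPickK (rows.length - 1) (b - a)) []) a)
      (pvGet (rows.getD (pvPickK (rows.length - 1) (b - a)) []) (b - 2 ^ pvPickK (rows.length - 1) (b - a)))

-- the main candidate loop of B
def pvBLoop (src : List Int) (md n : Int) (rows : List (List Int)) : List Int :=
  (PySem.List.pyRange 1 (n - 1) 1).foldl
    (fun peaks i =>
      if pvGet src i > pvGet src (i - 1) ∧ pvGet src i > pvGet src (i + 1) then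
        if max (i - md) 0 ≥ min (i + md) n ∨
            pvGet src i ≥ pvRangeMax rows (max (i - md) 0) (min (i + md) n) then
          peaks ++ [i]
        else peaks
      else peaks) []

def find_peaks_crest_alt (src : List Int) (min_distance : Int) (src_length : Int) : List Int :=
  if src_length < 3 then []
  else
    pvBLoop src min_distance src_length
      (((PySem.List.pyRange 0 src_length 1).map (fun j => pvGet src j)) ::
        pvRowsAux src_length.toNat ((PySem.List.pyRange 0 src_length 1).map (fun j => pvGet src j)) 1 src_length)

-- ===== PRECONDITION & SPEC =====
-- Pre_ excludes src_length > len(src) with src_length ≥ 3: there A reads past the end of src and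
-- raises IndexError on typical inputs; the occasional value it does return (when short-circuit
-- evaluation happens to skip every out-of-range read) is an accident of evaluation order.
def Pre_find_peaks_crest (src : List Int) (min_distance : Int) (src_length : Int) : Prop :=
  src_length ≤ PySem.List.len src ∨ src_length ≤ 2
instance (src : List Int) (min_distance : Int) (src_length : Int) : Decidable (Pre_find_peaks_crest src min_distance src_length) := by unfold Pre_find_peaks_crest; infer_instance

def pvWitness_find_peaks_crest : List Int × Int × Int := ([1, 3, 1], 1, 3)

def Spec_find_peaks_crest (src : List Int) (min_distance : Int) (src_length : Int) (out : List Int) : Prop := out = find_peaks_crest_alt src min_distance src_length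
instance (src : List Int) (min_distance : Int) (src_length : Int) (out : List Int) : Decidable (Spec_find_peaks_crest src min_distance src_length out) := by unfold Spec_find_peaks_crest; infer_instance

-- ===== CLAIM (what is proved, stated in full; the proofs are below) =====
def Claim_equal_find_peaks_crest : Prop := ∀ (src : List Int) (min_distance : Int) (src_length : Int), Dom_find_peaks_crest src min_distance src_length → Pre_find_peaks_crest src min_distance src_length → Spec_find_peaks_crest src min_distance src_length (find_peaks_crest src min_distance src_length)

-- ===== LEMMAS AND PROOFS =====

-- m is the maximum of pvGet src over the index interval [a, b)
def pvIsMax (src : List Int) (a b m : Int) : Prop :=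
  (∀ j, a ≤ j → j < b → pvGet src j ≤ m) ∧ ∃ j, a ≤ j ∧ j < b ∧ pvGet src j = m

lemma pvIsMax_union {src : List Int} {a c c' b m1 m2 : Int}
    (h1 : pvIsMax src a c m1) (h2 : pvIsMax src c' b m2)
    (hac : a ≤ c') (hcc : c' ≤ c) (hcb : c ≤ b) :
    pvIsMax src a b (max m1 m2) := by
  obtain ⟨u1, j1, hj1a, hj1b, hj1e⟩ := h1
  obtain ⟨u2, j2, hj2a, hj2b, hj2e⟩ := h2
  constructor
  · intro j hja hjb
    by_cases hjc : j < c
    · exact le_trans (u1 j hja hjc) (le_max_left _ _)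
    · exact le_trans (u2 j (by omega) hjb) (le_max_right _ _)
  · rcases max_choice m1 m2 with h | h
    · exact ⟨j1, hj1a, by omega, by rw [hj1e, h]⟩
    · exact ⟨j2, by omega, hj2b, by rw [hj2e, h]⟩

lemma pvIsMax_le_iff {src : List Int} {a b m : Int} (h : pvIsMax src a b m) (v : Int) :
    m ≤ v ↔ ∀ j, a ≤ j → j < b → pvGet src j ≤ v := by
  obtain ⟨u, j0, hj0a, hj0b, hj0e⟩ := h
  constructor
  · intro hm j hja hjb; exact le_trans (u j hja hjb) hm
  · intro hall; rw [← hj0e]; exact hall j0 hj0a hj0b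

-- row k of the table holds the maxima of all width-2^k windows
def pvRowOK (src : List Int) (n : Int) (k : Nat) (row : List Int) : Prop :=
  ∀ j : Int, 0 ≤ j → j < n - 2 ^ k + 1 → pvIsMax src j (j + 2 ^ k) (pvGet row j)

lemma pvRow0_ok (src : List Int) (n : Int) :
    pvRowOK src n 0 ((PySem.List.pyRange 0 n 1).map (fun j => pvGet src j)) := by
  intro j hj0 hjn
  have hget : pvGet ((PySem.List.pyRange 0 n 1).map (fun j => pvGet src j)) j = pvGet src j := by
    unfold pvGet
    exact PySem.List.pyGetD_map_pyRange_of_nonneg _ n j 0 hj0 (by simpa using hjn)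
  rw [hget]
  refine ⟨fun j' h1 h2 => ?_, j, le_refl j, by simp, rfl⟩
  have : j' = j := by simp at h2; omega
  simp [this]

lemma pvNextRow_ok {src : List Int} {n : Int} {k : Nat} {prev : List Int}
    (hp : pvRowOK src n k prev) :
    pvRowOK src n (k + 1) (pvNextRow prev (2 ^ k) n) := by
  have hpow : (2 : Int) ^ (k + 1) = 2 ^ k + 2 ^ k := by rw [pow_succ]; ring
  have hwpos : (0 : Int) < 2 ^ k := by positivity
  intro j hj0 hjn
  rw [hpow] at hjn
  have hget : pvGet (pvNextRow prev (2 ^ k) n) j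
      = max (pvGet prev j) (pvGet prev (j + 2 ^ k)) := by
    unfold pvNextRow pvGet
    exact PySem.List.pyGetD_map_pyRange_of_nonneg _ _ j 0 hj0 (by omega)
  rw [hget]
  have h1 := hp j hj0 (by omega)
  have h2 := hp (j + 2 ^ k) (by omega) (by omega)
  have hu := pvIsMax_union h1 h2 (by omega) (by omega) (by omega)
  have : j + 2 ^ k + 2 ^ k = j + 2 ^ (k + 1) := by rw [hpow]; ring
  rwa [this] at hu

lemma pvRowsAux_ok (src : List Int) (n : Int) :
    ∀ (fuel k : Nat) (prev : List Int),
      n < 2 ^ (k + fuel) → pvRowOK src n k prev →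
      (∀ t : Nat, t < (pvRowsAux fuel prev (2 ^ k) n).length →
          pvRowOK src n (k + 1 + t) ((pvRowsAux fuel prev (2 ^ k) n).getD t []))
        ∧ n < 2 ^ (k + (pvRowsAux fuel prev (2 ^ k) n).length + 1) := by
  intro fuel
  induction fuel with
  | zero =>
    intro k prev hfuel _
    refine ⟨fun t ht => by simp [pvRowsAux] at ht, ?_⟩
    simp only [pvRowsAux, List.length_nil]
    calc n < 2 ^ (k + 0) := hfuel
      _ ≤ 2 ^ (k + 0 + 1) := by
        apply pow_le_pow_right₀ (by norm_num) (by omega)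
  | succ f ih =>
    intro k prev hfuel hp
    have hpow : (2 : Int) * 2 ^ k = 2 ^ (k + 1) := by rw [pow_succ]; ring
    by_cases hg : 2 * (2 : Int) ^ k ≤ n
    · have hg' : (2 : Int) ^ (k + 1) ≤ n := by rw [← hpow]; exact hg
      have hrec := ih (k + 1) (pvNextRow prev (2 ^ k) n)
        (by rw [show k + 1 + f = k + (f + 1) from by omega]; exact hfuel)
        (pvNextRow_ok hp)
      simp only [pvRowsAux, hpow, if_pos hg']
      constructor
      · intro t ht
        cases t with
        | zero =>
          simpa using pvNextRow_ok hp
        | succ t' =>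
          have := hrec.1 t' (by simpa using ht)
          rw [show k + 1 + (t' + 1) = k + 1 + 1 + t' from by omega]
          simpa using this
      · rw [List.length_cons,
          show k + ((pvRowsAux f (pvNextRow prev (2 ^ k) n) (2 ^ (k + 1)) n).length + 1) + 1
            = k + 1 + (pvRowsAux f (pvNextRow prev (2 ^ k) n) (2 ^ (k + 1)) n).length + 1 from by omega]
        exact hrec.2
    · simp only [pvRowsAux, if_neg hg]
      refine ⟨fun t ht => by simp at ht, ?_⟩
      push_neg at hg
      simpa [hpow] using hg

lemma pvPickK_le (K : Nat) (d : Int) : pvPickK K d ≤ K := by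
  induction K with
  | zero => simp [pvPickK]
  | succ K ih =>
    simp only [pvPickK]
    split
    · omega
    · omega

lemma pvPickK_lower (K : Nat) (d : Int) (hd : 1 ≤ d) : (2 : Int) ^ pvPickK K d ≤ d := by
  induction K with
  | zero => simpa [pvPickK] using hd
  | succ K ih =>
    simp only [pvPickK]
    split
    · exact ih
    · omega

lemma pvPickK_upper (K : Nat) (d : Int) : d < 2 ^ (pvPickK K d + 1) ∨ pvPickK K d = K := by
  induction K with
  | zero => right; rfl
  | succ K ih =>
    simp only [pvPickK]
    split
    · rename_i hlt
      rcases ih with h | h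
      · exact Or.inl h
      · exact Or.inl (by rwa [h])
    · right; rfl

lemma pvRangeMax_isMax {src : List Int} {n : Int} {rows : List (List Int)}
    (hne : rows.length ≠ 0)
    (hrows : ∀ t : Nat, t < rows.length → pvRowOK src n t (rows.getD t []))
    (htop : n < 2 ^ rows.length)
    {a b : Int} (ha : 0 ≤ a) (hab : a < b) (hb : b ≤ n) :
    pvIsMax src a b (pvRangeMax rows a b) := by
  set K := rows.length - 1 with hK
  set k := pvPickK K (b - a) with hk
  have hkK : k ≤ K := pvPickK_le K (b - a)
  have hlow : (2 : Int) ^ k ≤ b - a := pvPickK_lower K (b - a) (by omega)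
  have hwpos : (0 : Int) < 2 ^ k := by positivity
  have hupp : b - a < 2 ^ (k + 1) := by
    rcases pvPickK_upper K (b - a) with h | h
    · exact h
    · have h1 : (2 : Int) ^ (K + 1) ≤ 2 ^ (k + 1) := by
        apply pow_le_pow_right₀ (by norm_num) (by omega)
      have h2 : n < 2 ^ (K + 1) := by
        rwa [show K + 1 = rows.length from by omega]
      omega
  have hpow : (2 : Int) ^ (k + 1) = 2 ^ k + 2 ^ k := by rw [pow_succ]; ring
  have hrow := hrows k (by omega)
  have hIa := hrow a ha (by omega)
  have hIb := hrow (b - 2 ^ k) (by omega) (by omega)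
  have hbw : b - 2 ^ k + 2 ^ k = b := by ring
  rw [hbw] at hIb
  have hu := pvIsMax_union hIa hIb (by omega) (by omega) (by omega)
  unfold pvRangeMax
  rw [← hK, ← hk]
  exact hu

lemma pvAScan_iff (src : List Int) (vi : Int) (js : List Int) :
    pvAScan src vi js = true ↔ ∀ j ∈ js, pvGet src j ≤ vi := by
  induction js with
  | nil => simp [pvAScan]
  | cons j js ih =>
    by_cases h : vi < pvGet src j
    · simp only [pvAScan, if_pos h]
      constructor
      · intro hfalse; cases hfalse
      · intro hall
        have := hall j (by simp)
        omega
    · simp only [pvAScan, if_neg h, ih, List.mem_cons]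
      constructor
      · rintro hall j' (rfl | hj')
        · omega
        · exact hall j' hj'
      · intro hall j' hj'; exact hall j' (Or.inr hj')

-- the two programs agree on EVERY input (both ports are total; Pre_ only marks where Python A raises)
lemma pv_equiv_all (src : List Int) (md L : Int) :
    find_peaks_crest src md L = find_peaks_crest_alt src md L := by
  by_cases hL : L < 3
  · unfold find_peaks_crest find_peaks_crest_alt
    rw [if_pos hL, PySem.List.pyRange_one_eq_nil (by omega : L - 1 ≤ 1)]
    rfl
  · push_neg at hL
    unfold find_peaks_crest find_peaks_crest_alt pvBLoop
    rw [if_neg (by omega)]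
    -- table facts
    have hr0 : pvRowOK src L 0 ((PySem.List.pyRange 0 L 1).map (fun j => pvGet src j)) :=
      pvRow0_ok src L
    have hfuel : L < 2 ^ (0 + L.toNat) := by
      have h1 : (L.toNat : Int) < 2 ^ L.toNat := by
        have := Nat.lt_two_pow_self (n := L.toNat)
        exact_mod_cast this
      have h2 : (L.toNat : Int) = L := Int.toNat_of_nonneg (by omega)
      simpa [h2] using h1
    have haux := pvRowsAux_ok src L L.toNat 0
      ((PySem.List.pyRange 0 L 1).map (fun j => pvGet src j)) hfuel hr0
    rw [pow_zero] at haux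
    set row0 := (PySem.List.pyRange 0 L 1).map (fun j => pvGet src j) with hrow0def
    set rows := row0 :: pvRowsAux L.toNat row0 1 L with hrowsdef
    have hrowsOK : ∀ t : Nat, t < rows.length → pvRowOK src L t (rows.getD t []) := by
      intro t ht
      cases t with
      | zero => simpa using hr0
      | succ t' =>
        have := haux.1 t' (by simp [hrowsdef] at ht; omega)
        rw [show (0 : Nat) + 1 + t' = t' + 1 from by omega] at this
        simpa [hrowsdef] using this
    have htop : L < 2 ^ rows.length := by
      have := haux.2
      rw [show (0 : Nat) + (pvRowsAux L.toNat row0 1 L).length + 1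
          = (pvRowsAux L.toNat row0 1 L).length + 1 from by omega] at this
      simpa [hrowsdef] using this
    -- both folds are filters
    have hbodyA : (fun (peaks : List Int) (i : Int) =>
        if pvGet src i > pvGet src (i - 1) ∧ pvGet src i > pvGet src (i + 1) then
          if pvAScan src (pvGet src i)
              (PySem.List.pyRange (max (i - md) 0) (min (i + md) L) 1) then
            peaks ++ [i]
          else peaks
        else peaks)
        = (fun peaks i =>
          if ((decide (pvGet src i > pvGet src (i - 1) ∧ pvGet src i > pvGet src (i + 1))) &&
              pvAScan src (pvGet src i)
                (PySem.List.pyRange (max (i - md) 0) (min (i + md) L) 1)) = true then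
            peaks ++ [i] else peaks) := by
      funext peaks i
      by_cases h : pvGet src i > pvGet src (i - 1) ∧ pvGet src i > pvGet src (i + 1)
      · simp [h]
      · simp [h]
    have hbodyB : (fun (peaks : List Int) (i : Int) =>
        if pvGet src i > pvGet src (i - 1) ∧ pvGet src i > pvGet src (i + 1) then
          if max (i - md) 0 ≥ min (i + md) L ∨
              pvGet src i ≥ pvRangeMax rows (max (i - md) 0) (min (i + md) L) then
            peaks ++ [i]
          else peaks
        else peaks)
        = (fun peaks i =>
          if ((decide (pvGet src i > pvGet src (i - 1) ∧ pvGet src i > pvGet src (i + 1))) &&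
              (decide (max (i - md) 0 ≥ min (i + md) L ∨
                pvGet src i ≥ pvRangeMax rows (max (i - md) 0) (min (i + md) L)))) = true then
            peaks ++ [i] else peaks) := by
      funext peaks i
      by_cases h : pvGet src i > pvGet src (i - 1) ∧ pvGet src i > pvGet src (i + 1)
      · simp [h]
      · simp [h]
    rw [hbodyA, hbodyB,
      PySem.List.foldl_append_if _ (fun i => i) _ [],
      PySem.List.foldl_append_if _ (fun i => i) _ []]
    simp only [List.nil_append, List.map_id']
    apply List.filter_congr
    intro i hi
    rw [PySem.List.mem_pyRange_one] at hi
    by_cases hloc : pvGet src i > pvGet src (i - 1) ∧ pvGet src i > pvGet src (i + 1)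
    · rw [decide_eq_true hloc, Bool.true_and, Bool.true_and,
        Bool.eq_iff_iff, pvAScan_iff, decide_eq_true_eq]
      by_cases hab : min (i + md) L ≤ max (i - md) 0
      · constructor
        · intro _; left; omega
        · intro _ j hj
          rw [PySem.List.mem_pyRange_one] at hj
          omega
      · push_neg at hab
        have hM := pvRangeMax_isMax (n := L)
          (by simp [hrowsdef])
          hrowsOK htop
          (le_max_right _ _) hab (min_le_right _ _)
        have hle := pvIsMax_le_iff hM (pvGet src i)
        constructor
        · intro hall
          right
          rw [ge_iff_le, hle]
          intro j hja hjb
          exact hall j (by rw [PySem.List.mem_pyRange_one]; omega)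
        · rintro (h | h) j hj
          · omega
          · rw [PySem.List.mem_pyRange_one] at hj
            rw [ge_iff_le, hle] at h
            exact h j hj.1 hj.2
    · simp [hloc]

-- ===== VERDICT (by name: the statement is the Claim_ definition above) =====
theorem find_peaks_crest_spec : Claim_equal_find_peaks_crest := by
  intro src md L _ _
  exact pv_equiv_all src md L
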